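-- pv_equiv track=rewrite | github.com/moooooongi/python_codetest | 프로그래머스/2/388352. 비밀 코드 해독/비밀 코드 해독.py | solution
-- ===== SOURCE A (Python) =====
-- from itertools import combinations
--
-- def solution(n, q, ans):
--     answer = 0
--     #1~n까지모든 배열 돌아가기
--     #q[i] 번째 원소와 몇개 맞는지 체크
--     #ans[i]와 맞지 않을시 루프 다시 돌기
--     #ans[i]와 맞으면 answer +1
--     a = [i+1 for i in range(n)]
--     b = combinations(a, 5)
--     for var in b :
--         for i,j in zip(q,ans):
--             cnt = 0
--             for k in var:
--                 if k in i:
--                     cnt += 1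
--             if cnt != j:
--                 break
--         else :
--             answer += 1
--     return answer
-- ===== SOURCE B (Python) =====
-- from itertools import combinations
--
-- def solution(n, q, ans):
--     # Inverted index: for each value v in 1..n, the query indices whose list contains v.
--     m = min(len(q), len(ans))
--     target = list(ans[:m])
--     occ = [[j for j in range(m) if v in q[j]] for v in range(1, n + 1)]
--     answer = 0
--     for comb in combinations(range(1, n + 1), 5):
--         counts = [0] * m
--         for v in comb:
--             for j in occ[v - 1]:
--                 counts[j] += 1
--         if counts == target:
--             answer += 1
--     return answer
-- ===== Notes on version B (the rewrite author's own statement) =====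
-- stated objective: alternative
-- what changed: B precomputes an inverted index mapping each value 1..n to the list of query indices containing it, then for each 5-combination accumulates per-query match counts by iterating the combination's numbers through the index (numbers-outer, queries-inner) and compares the counts vector to ans, instead of A's queries-outer loop with a membership scan of the combination against each query list.
import Mathlib
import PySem

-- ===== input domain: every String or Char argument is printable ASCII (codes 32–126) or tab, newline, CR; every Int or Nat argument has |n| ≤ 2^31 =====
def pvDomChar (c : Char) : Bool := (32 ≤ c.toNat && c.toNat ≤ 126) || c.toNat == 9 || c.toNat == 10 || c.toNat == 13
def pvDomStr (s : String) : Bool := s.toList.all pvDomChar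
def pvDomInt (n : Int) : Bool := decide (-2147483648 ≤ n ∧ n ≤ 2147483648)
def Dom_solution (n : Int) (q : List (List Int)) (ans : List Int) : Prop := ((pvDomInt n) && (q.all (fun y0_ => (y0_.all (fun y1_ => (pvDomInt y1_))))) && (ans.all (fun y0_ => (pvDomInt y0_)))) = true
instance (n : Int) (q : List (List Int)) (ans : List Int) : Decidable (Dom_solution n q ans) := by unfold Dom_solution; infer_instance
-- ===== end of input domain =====

-- B replaces A's per-combination membership scans over every query by a precomputed
-- inverted index (value -> query indices), flipping the loop nesting; objective: alternative.

-- ===== PORT A =====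
-- inner loop 'for k in var: if k in i: cnt += 1'
def countA (var : List Int) (i : List Int) : Int :=
  var.foldl (fun cnt k => if i.contains k then cnt + 1 else cnt) 0

-- the 'for i,j in zip(q,ans): … break / else' loop: true ↔ the else branch runs
def checkA : List (List Int × Int) → List Int → Bool
  | [], _ => true
  | (i, j) :: rest, var => if countA var i ≠ j then false else checkA rest var

def solution (n : Int) (q : List (List Int)) (ans : List Int) : Int :=
  let a := (PySem.List.pyRange 0 n 1).map (fun i => i + 1)
  let b := PySem.List.combinations a 5
  b.foldl (fun answer var => if checkA (q.zip ans) var then answer + 1 else answer) 0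

-- ===== PORT B =====
-- counts[j] += 1  (j is always < counts.length when Source B calls it)
def incAt (cs : List Int) (j : Nat) : List Int := cs.set j (cs.getD j 0 + 1)

def solution_alt (n : Int) (q : List (List Int)) (ans : List Int) : Int :=
  let m := min q.length ans.length
  let target : List Int := ans.take m
  let occ := (PySem.List.pyRange 1 (n + 1) 1).map
    (fun v => (List.range m).filter (fun j => (q.getD j []).contains v))
  (PySem.List.combinations (PySem.List.pyRange 1 (n + 1) 1) 5).foldl
    (fun (answer : Int) (comb : List Int) =>
      let counts : List Int := comb.foldl
        (fun cs v => (occ.getD (v - 1).toNat []).foldl incAt cs)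
        (List.replicate m 0)
      if counts = target then answer + 1 else answer) 0

-- ===== PRECONDITION & SPEC =====
def Spec_solution (n : Int) (q : List (List Int)) (ans : List Int) (out : Int) : Prop := out = solution_alt n q ans
instance (n : Int) (q : List (List Int)) (ans : List Int) (out : Int) : Decidable (Spec_solution n q ans out) := by unfold Spec_solution; infer_instance

-- ===== CLAIM (what is proved, stated in full; the proofs are below) =====
def Claim_equal_solution : Prop := ∀ (n : Int) (q : List (List Int)) (ans : List Int), Dom_solution n q ans → Spec_solution n q ans (solution n q ans)

-- ===== LEMMAS AND PROOFS =====

lemma range_shift (n : Int) :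
    (PySem.List.pyRange 0 n 1).map (fun i => i + 1) = PySem.List.pyRange 1 (n + 1) 1 := by
  simp [PySem.List.pyRange_one, List.map_map]
  intro a _; ring

lemma countA_eq_countP (var i : List Int) :
    countA var i = (var.countP (fun k => i.contains k) : Int) := by
  unfold countA
  rw [PySem.List.foldl_count_if]
  norm_num
  congr 1
  funext k
  simp

lemma checkA_iff (ps : List (List Int × Int)) (var : List Int) :
    checkA ps var = true ↔ ∀ p ∈ ps, countA var p.1 = p.2 := by
  induction ps with
  | nil => simp [checkA]
  | cons p rest ih =>
    obtain ⟨i, j⟩ := p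
    by_cases h : countA var i = j
    · simp [checkA, h, ih]
    · simp [checkA, h]

lemma length_foldl_incAt (L : List Nat) (cs : List Int) :
    (L.foldl incAt cs).length = cs.length := by
  induction L generalizing cs with
  | nil => rfl
  | cons x t ih => rw [List.foldl_cons, ih]; simp [incAt]

lemma getD_foldl_incAt (L : List Nat) (cs : List Int) (j : Nat) (hj : j < cs.length) :
    (L.foldl incAt cs).getD j 0 = cs.getD j 0 + (L.count j : Int) := by
  induction L generalizing cs with
  | nil => simp
  | cons x t ih =>
    rw [List.foldl_cons, ih _ (by simp [incAt, hj]), List.count_cons]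
    unfold incAt
    by_cases h : x = j
    · subst h
      rw [List.getD_eq_getElem _ _ (by simpa using hj), List.getElem_set_self]
      simp
      omega
    · simp [List.getD, List.getElem?_set_ne h, h]

lemma occ_getD (n : Int) (q : List (List Int)) (m : Nat) (v : Int) (h1 : 1 ≤ v) (h2 : v ≤ n) :
    (((PySem.List.pyRange 1 (n + 1) 1).map
        (fun v => (List.range m).filter (fun j => (q.getD j []).contains v))).getD (v - 1).toNat [])
      = (List.range m).filter (fun j => (q.getD j []).contains v) := by
  have hk : (v - 1).toNat < ((PySem.List.pyRange 1 (n + 1) 1).map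
      (fun v => (List.range m).filter (fun j => (q.getD j []).contains v))).length := by
    simp [PySem.List.length_pyRange_one]; omega
  rw [List.getD_eq_getElem _ _ hk, List.getElem_map,
      PySem.List.getElem_pyRange_one]
  have : (1 : Int) + ((v - 1).toNat : Int) = v := by omega
  rw [this]

lemma count_filter_range (m j : Nat) (p : Nat → Bool) (hj : j < m) :
    ((List.range m).filter p).count j = if p j then 1 else 0 := by
  by_cases h : p j = true
  · simp [List.count_filter, h, List.count_range, hj]
  · rw [if_neg h, List.count_eq_zero]
    simp [List.mem_filter, h]

-- counts accumulation: the inverted-index fold adds, at slot j, A's match count for query j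
lemma counts_fold (n : Int) (q : List (List Int)) (m : Nat)
    (var : List Int) (cs : List Int) (j : Nat)
    (hlen : cs.length = m) (hj : j < m)
    (hvar : ∀ v ∈ var, 1 ≤ v ∧ v ≤ n) :
    (var.foldl
        (fun cs v => ((((PySem.List.pyRange 1 (n + 1) 1).map
            (fun v => (List.range m).filter (fun j => (q.getD j []).contains v))).getD (v - 1).toNat []).foldl incAt cs))
        cs).getD j 0
      = cs.getD j 0 + (var.countP (fun v => (q.getD j []).contains v) : Int) := by
  induction var generalizing cs with
  | nil => simp
  | cons v t ih =>
    rw [List.foldl_cons, ih _ (by rw [length_foldl_incAt]; exact hlen)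
          (fun w hw => hvar w (List.mem_cons_of_mem _ hw)),
        occ_getD n q m v (hvar v (List.mem_cons_self)).1 (hvar v (List.mem_cons_self)).2,
        getD_foldl_incAt _ _ _ (by omega),
        count_filter_range m j _ hj, List.countP_cons]
    push_cast
    ring

lemma length_counts_fold (n : Int) (q : List (List Int)) (m : Nat)
    (var : List Int) (cs : List Int) :
    (var.foldl
        (fun cs v => ((((PySem.List.pyRange 1 (n + 1) 1).map
            (fun v => (List.range m).filter (fun j => (q.getD j []).contains v))).getD (v - 1).toNat []).foldl incAt cs))
        cs).length = cs.length := by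
  induction var generalizing cs with
  | nil => rfl
  | cons v t ih => rw [List.foldl_cons, ih, length_foldl_incAt]

-- pointwise agreement of the two per-combination tests, for combinations drawn from 1..n
lemma pointwise (n : Int) (q : List (List Int)) (ans : List Int)
    (var : List Int) (hvar : ∀ v ∈ var, 1 ≤ v ∧ v ≤ n) :
    (checkA (q.zip ans) var = true)
      ↔ (var.foldl
          (fun cs v => ((((PySem.List.pyRange 1 (n + 1) 1).map
              (fun v => (List.range (min q.length ans.length)).filter (fun j => (q.getD j []).contains v))).getD (v - 1).toNat []).foldl incAt cs))
          (List.replicate (min q.length ans.length) 0)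
          = ans.take (min q.length ans.length)) := by
  set m := min q.length ans.length with hm
  rw [checkA_iff]
  have hlenf : ∀ cs : List Int, (var.foldl
      (fun cs v => ((((PySem.List.pyRange 1 (n + 1) 1).map
          (fun v => (List.range m).filter (fun j => (q.getD j []).contains v))).getD (v - 1).toNat []).foldl incAt cs)) cs).length = cs.length :=
    fun cs => length_counts_fold n q m var cs
  constructor
  · intro h
    apply List.ext_getElem
    · rw [hlenf]; simp [hm]
    · intro j hj1 hj2
      have hjm : j < m := by rw [hlenf] at hj1; simpa using hj1
      have hq : j < q.length := by omega
      have ha : j < ans.length := by omega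
      have hp : countA var q[j] = ans[j] := h (q[j], ans[j]) (by
        rw [List.mem_iff_getElem]
        exact ⟨j, by simp only [List.length_zip]; omega, by rw [List.getElem_zip]⟩)
      have hqj : q.getD j [] = q[j] := List.getD_eq_getElem _ _ hq
      rw [← List.getD_eq_getElem _ 0 hj1,
          counts_fold n q m var _ j (by simp) hjm hvar,
          List.getElem_take,
          List.getD_eq_getElem _ 0 (by simpa using hjm), List.getElem_replicate, hqj]
      rw [countA_eq_countP] at hp
      omega
  · intro h p hp
    rw [List.mem_iff_getElem] at hp
    obtain ⟨j, hj, hpj⟩ := hp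
    have hjm : j < m := by simp [List.length_zip] at hj; omega
    have hq : j < q.length := by omega
    have ha : j < ans.length := by omega
    have hqj : q.getD j [] = q[j] := List.getD_eq_getElem _ _ hq
    have h2 := congrArg (fun l => l.getD j 0) h
    simp only at h2
    rw [counts_fold n q m var _ j (by simp) hjm hvar,
        List.getD_eq_getElem _ 0 (by simp [hm]; omega : j < (ans.take m).length),
        List.getElem_take,
        List.getD_eq_getElem _ 0 (by simpa using hjm), List.getElem_replicate,
        hqj] at h2
    have hgoal : countA var q[j] = ans[j] → countA var p.1 = p.2 := by
      rw [← hpj, List.getElem_zip]; exact id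
    apply hgoal
    rw [countA_eq_countP]
    omega

-- ===== VERDICT (by name: the statement is the Claim_ definition above) =====
theorem solution_spec : Claim_equal_solution := by
  intro n q ans _hdom
  unfold Spec_solution solution solution_alt
  simp only [range_shift]
  apply PySem.List.foldl_congr_mem
  intro acc var hvar
  have hmem : ∀ v ∈ var, 1 ≤ v ∧ v ≤ n := by
    intro v hv
    have hsub := (PySem.List.mem_combinations_iff _ _ _).mp hvar |>.1
    have : v ∈ PySem.List.pyRange 1 (n + 1) 1 := hsub.mem hv
    rw [PySem.List.mem_pyRange_one] at this
    omega
  by_cases h : checkA (q.zip ans) var = true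
  · rw [if_pos h, if_pos ((pointwise n q ans var hmem).mp h)]
  · rw [if_neg h, if_neg (fun hc => h ((pointwise n q ans var hmem).mpr hc))]
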